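-- pv_equiv track=rewrite | github.com/alexdilion/ca117 | 11-week/1-lab/doubles_111.py | countDoubleVowels
-- ===== SOURCE A (Python) =====
-- vowels = "aeiou"
--
-- def countDoubleVowels(s):
--     i = 0
--     count = 0
--     while i < len(s) - 1:
--         if s[i] in vowels and s[i] == s[i + 1]:
--             count += 1
--             i += 1
--
--         i += 1
--
--     return count
-- ===== SOURCE B (Python) =====
-- import re
--
-- _DOUBLE_VOWEL = re.compile(r'aa|ee|ii|oo|uu')
--
-- def countDoubleVowels(s):
--     return len(_DOUBLE_VOWEL.findall(s))
-- ===== Notes on version B (the rewrite author's own statement) =====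
-- stated objective: idiomatic
-- what changed: Replaces A's explicit while-loop with manual index arithmetic and skip-by-2 bookkeeping by a single non-overlapping regex scan, len(re.findall(r'aa|ee|ii|oo|uu', s)), whose left-to-right match-and-skip semantics reproduces A's behaviour exactly.
import Mathlib
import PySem

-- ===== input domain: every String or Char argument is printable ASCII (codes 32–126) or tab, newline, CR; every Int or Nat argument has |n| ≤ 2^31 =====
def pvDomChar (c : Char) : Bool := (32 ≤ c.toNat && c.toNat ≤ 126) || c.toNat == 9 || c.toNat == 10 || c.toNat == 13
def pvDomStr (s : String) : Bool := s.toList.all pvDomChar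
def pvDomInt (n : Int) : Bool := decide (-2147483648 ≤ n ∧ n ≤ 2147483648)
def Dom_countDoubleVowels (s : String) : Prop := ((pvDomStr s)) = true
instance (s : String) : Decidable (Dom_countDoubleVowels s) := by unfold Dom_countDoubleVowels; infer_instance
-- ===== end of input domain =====

-- B replaces A's explicit skip-by-2 index loop with a non-overlapping regex scan
-- (re.findall of aa|ee|ii|oo|uu), ported by hand as a left-to-right match-and-skip
-- recursion over the character list; objective: idiomatic, same cost.

-- ===== PORT A =====
-- while loop over index i; s[i] accesses are guarded by i + 1 < len s, so in range.
def aLoop (cs : List Char) (i : Nat) (count : Int) : Int :=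
  if h : i + 1 < cs.length then
    if ("aeiou".toList.contains (cs[i]'(by omega)) && (cs[i]'(by omega) == cs[i + 1]'h)) then
      aLoop cs (i + 2) (count + 1)
    else
      aLoop cs (i + 1) count
  else count
termination_by cs.length - i
decreasing_by all_goals omega

def countDoubleVowels (s : String) : Int := aLoop s.toList 0 0

-- ===== PORT B =====
-- Hand port of the regex engine's left-to-right non-overlapping scan for the
-- pattern aa|ee|ii|oo|uu: at each position try the five alternatives in order;
-- on a match consume two characters, otherwise advance one. Exact for this
-- pattern (each alternative has length 2, no backtracking interaction).
def reTryAlt (a b : Char) : Bool :=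
  (a == 'a' && b == 'a') || (a == 'e' && b == 'e') || (a == 'i' && b == 'i') ||
  (a == 'o' && b == 'o') || (a == 'u' && b == 'u')

def reScan : List Char → Int
  | a :: b :: rest => if reTryAlt a b then 1 + reScan rest else reScan (b :: rest)
  | _ => 0

def countDoubleVowels_alt (s : String) : Int := reScan s.toList

-- ===== PRECONDITION & SPEC =====
def Spec_countDoubleVowels (s : String) (out : Int) : Prop := out = countDoubleVowels_alt s
instance (s : String) (out : Int) : Decidable (Spec_countDoubleVowels s out) := by unfold Spec_countDoubleVowels; infer_instance

-- ===== CLAIM (what is proved, stated in full; the proofs are below) =====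
def Claim_equal_countDoubleVowels : Prop := ∀ (s : String), Dom_countDoubleVowels s → Spec_countDoubleVowels s (countDoubleVowels s)

-- ===== LEMMAS AND PROOFS =====

-- A's test "s[i] in vowels and s[i] == s[i+1]" equals the regex alternation test.
theorem cond_eq (a b : Char) :
    ("aeiou".toList.contains a && (a == b)) = reTryAlt a b := by
  by_cases h : a = b
  · subst h
    by_cases h1 : a = 'a'
    · subst h1; decide
    by_cases h2 : a = 'e'
    · subst h2; decide
    by_cases h3 : a = 'i'
    · subst h3; decide
    by_cases h4 : a = 'o'
    · subst h4; decide
    by_cases h5 : a = 'u'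
    · subst h5; decide
    simp [reTryAlt, h1, h2, h3, h4, h5]
  · -- a ≠ b: both sides are false; each alternative a == 'x' && b == 'x' forces a = b
    have key : ∀ c : Char, (a == c && b == c) = false := by
      intro c
      cases hac : a == c with
      | false => rfl
      | true =>
        cases hbc : b == c with
        | false => simp
        | true =>
          exact absurd ((beq_iff_eq.mp hac).trans (beq_iff_eq.mp hbc).symm) h
    have hab : (a == b) = false := by simp [h]
    simp [reTryAlt, hab, key]

theorem aLoop_eq (n : Nat) :
    ∀ (cs : List Char) (i : Nat) (count : Int), cs.length - i ≤ n →
      aLoop cs i count = count + reScan (cs.drop i) := by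
  induction n with
  | zero =>
    intro cs i count hn
    rw [aLoop]
    have h1 : ¬ (i + 1 < cs.length) := by omega
    have h2 : cs.drop i = [] := List.drop_eq_nil_of_le (by omega)
    simp [h1, h2, reScan]
  | succ n ih =>
    intro cs i count hn
    rw [aLoop]
    by_cases h : i + 1 < cs.length
    · have hdrop : cs.drop i = cs[i]'(by omega) :: cs[i + 1]'h :: cs.drop (i + 2) := by
        rw [← List.getElem_cons_drop (as := cs) (i := i) (by omega)]
        congr 1
        rw [← List.getElem_cons_drop (as := cs) (i := i + 1) h]
      rw [hdrop]
      simp only [h, dif_pos, reScan, cond_eq]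
      by_cases hc : reTryAlt (cs[i]'(by omega)) (cs[i + 1]'h) = true
      · rw [if_pos hc, if_pos hc, ih cs (i + 2) (count + 1) (by omega)]
        ring
      · rw [if_neg hc, if_neg hc, ih cs (i + 1) count (by omega)]
        rw [← List.getElem_cons_drop (as := cs) (i := i + 1) h]
    · -- here len(s) ≤ i + 1, so at most one character remains and reScan gives 0
      have hlen : (cs.drop i).length ≤ 1 := by
        rw [List.length_drop]; omega
      match hd : cs.drop i with
      | [] => simp [h, reScan]
      | [x] => simp [h, reScan]
      | x :: y :: r => rw [hd] at hlen; simp at hlen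

-- ===== VERDICT (by name: the statement is the Claim_ definition above) =====
theorem countDoubleVowels_spec : Claim_equal_countDoubleVowels := by
  intro s _
  unfold Spec_countDoubleVowels countDoubleVowels countDoubleVowels_alt
  rw [aLoop_eq s.toList.length s.toList 0 0 (by omega)]
  simp
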